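-- pv_equiv track=rewrite | github.com/kopok2/CodeforcesSolutionsPython | src/696A/cdf_696A.py | fee_on_path
-- ===== SOURCE A (Python) =====
-- def path_to_root(n):
--     path = [n]
--     while n != 1:
--         if n % 2:
--             path.append((n - 1) // 2)
--             n = (n - 1) // 2
--         else:
--             path.append(n // 2)
--             n //= 2
--     return path
--
-- def path_beetwen(a, b):
--     p1 = path_to_root(a)
--     p2 = path_to_root(b)
--     l1 = len(p1)
--     l2 = len(p2)
--     x = 0
--     while x < l2:
--         if p2[x] in p1:
--             break
--         x += 1
--     path = p1[:p1.index(p2[x]) + 1] + p2[:x][::-1]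
--     return path
--
-- def fee_on_path(fees, a, b):
--     path = path_beetwen(a, b)
--     total_fee = 0
--     for x in range(len(path) - 1):
--         fee = str(path[x]) + "_" + str(path[x + 1])
--         if fee in fees.keys():
--             total_fee += fees[fee]
--     return total_fee
-- ===== SOURCE B (Python) =====
-- def fee_on_path(fees, a, b):
--     # Walk the deeper node up toward the root until the two meet (LCA),
--     # summing the fee of each edge crossed; no paths are materialised.
--     total = 0
--     while a != b:
--         if a > b:
--             total += fees.get(str(a) + "_" + str(a // 2), 0)
--             a //= 2
--         else:
--             total += fees.get(str(b // 2) + "_" + str(b), 0)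
--             b //= 2
--     return total
-- ===== Notes on version B (the rewrite author's own statement) =====
-- stated objective: alternative
-- what changed: Instead of building both root paths as lists, finding the meeting point by repeated 'in'/'index' scans and then iterating over the joined path, B walks the deeper of the two nodes up to its parent in a single loop, summing each edge fee on the way; no lists are built or scanned.
import Mathlib
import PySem

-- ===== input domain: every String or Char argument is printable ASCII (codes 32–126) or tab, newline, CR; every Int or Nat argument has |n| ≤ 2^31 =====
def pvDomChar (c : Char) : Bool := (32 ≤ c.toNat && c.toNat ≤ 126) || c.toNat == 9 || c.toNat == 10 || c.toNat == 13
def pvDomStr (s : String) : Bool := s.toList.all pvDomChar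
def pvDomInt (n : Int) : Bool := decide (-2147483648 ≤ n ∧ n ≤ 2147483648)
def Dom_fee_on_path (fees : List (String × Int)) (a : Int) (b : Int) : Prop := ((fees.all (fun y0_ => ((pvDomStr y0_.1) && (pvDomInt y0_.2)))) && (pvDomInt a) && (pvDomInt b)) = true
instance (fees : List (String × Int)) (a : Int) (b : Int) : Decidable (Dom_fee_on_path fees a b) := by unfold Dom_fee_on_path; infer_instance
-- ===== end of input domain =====

-- B replaces A's list-building passes (two root paths, a repeated-membership/index scan, then a fee loop
-- over the joined path) by a single walk-up loop moving the deeper node to its parent while summing fees;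
-- objective: alternative (no intermediate lists, same measured cost on the generated inputs).

-- ===== PORT A =====

-- the edge-key string both Pythons build: str(u) + "_" + str(v)
def edgeKey (u v : Int) : String := PySem.Int.toStr u ++ "_" ++ PySem.Int.toStr v

-- path_to_root(n): 'while n != 1', appending the parent each turn; for n < 1 the Python loop never
-- terminates (excluded by Pre_), so the 'n ≤ 1' guard only totalises: it agrees with 'n == 1' on Pre_.
def pathToRoot (n : Int) : List Int :=
  if n ≤ 1 then [n]
  else if PySem.Int.mod n 2 ≠ 0 then
    n :: pathToRoot (PySem.Int.floordiv (n - 1) 2)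
  else
    n :: pathToRoot (PySem.Int.floordiv n 2)
termination_by n.toNat
decreasing_by all_goals (rw [PySem.Int.floordiv_eq_ediv_of_pos (by omega)]; omega)

-- the 'x = 0; while x < l2: if p2[x] in p1: break; x += 1' scan of path_beetwen
def findXAux (p1 : List Int) : List Int → Nat → Nat
  | [], x => x
  | h :: t, x => if p1.contains h then x else findXAux p1 t (x + 1)

def pathBeetwen (a b : Int) : List Int :=
  let p1 := pathToRoot a
  let p2 := pathToRoot b
  let x := findXAux p1 p2 0
  let v := (PySem.List.pyGet? p2 (x : Int)).getD 0   -- p2[x]; IndexError unreachable under Pre_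
  let i := (PySem.List.index? p1 v).getD 0           -- p1.index(p2[x]); ValueError unreachable under Pre_
  p1.take (i + 1) ++ (p2.take x).reverse             -- p1[:i+1] + p2[:x][::-1]

-- 'for x in range(len(path)-1): fee = …; if fee in fees.keys(): total_fee += fees[fee]'
def feeSum (fees : List (String × Int)) : List Int → Int
  | u :: v :: rest =>
      (match (PySem.Dict.mk fees).get? (edgeKey u v) with
       | some f => f
       | none => 0) + feeSum fees (v :: rest)
  | _ => 0

def fee_on_path (fees : List (String × Int)) (a : Int) (b : Int) : Int :=
  feeSum fees (pathBeetwen a b)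

-- ===== PORT B =====
-- Source B: 'while a != b: move the larger (deeper) node to its parent, adding fees.get(key, 0)'.
-- The 'a ≤ 0 ∨ b ≤ 0' guard only totalises: the Python loop diverges there (excluded by Pre_).
def fee_on_path_alt (fees : List (String × Int)) (a : Int) (b : Int) : Int :=
  if a ≤ 0 ∨ b ≤ 0 then 0
  else if a = b then 0
  else if b < a then
    (PySem.Dict.mk fees).getD (edgeKey a (PySem.Int.floordiv a 2)) 0
      + fee_on_path_alt fees (PySem.Int.floordiv a 2) b
  else
    (PySem.Dict.mk fees).getD (edgeKey (PySem.Int.floordiv b 2) b) 0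
      + fee_on_path_alt fees a (PySem.Int.floordiv b 2)
termination_by a.toNat + b.toNat
decreasing_by all_goals (rw [PySem.Int.floordiv_eq_ediv_of_pos (by omega)]; omega)

-- ===== PRECONDITION & SPEC =====
-- Pre_: both nodes positive — for a ≤ 0 or b ≤ 0 the Python A never returns (path_to_root loops forever).
def Pre_fee_on_path (fees : List (String × Int)) (a : Int) (b : Int) : Prop := 1 ≤ a ∧ 1 ≤ b
instance (fees : List (String × Int)) (a : Int) (b : Int) : Decidable (Pre_fee_on_path fees a b) := by unfold Pre_fee_on_path; infer_instance
def pvWitness_fee_on_path : (List (String × Int)) × Int × Int := ([("2_1", 5)], 2, 1)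

def Spec_fee_on_path (fees : List (String × Int)) (a : Int) (b : Int) (out : Int) : Prop := out = fee_on_path_alt fees a b
instance (fees : List (String × Int)) (a : Int) (b : Int) (out : Int) : Decidable (Spec_fee_on_path fees a b out) := by unfold Spec_fee_on_path; infer_instance

-- ===== CLAIM (what is proved, stated in full; the proofs are below) =====
def Claim_equal_fee_on_path : Prop := ∀ (fees : List (String × Int)) (a : Int) (b : Int), Dom_fee_on_path fees a b → Pre_fee_on_path fees a b → Spec_fee_on_path fees a b (fee_on_path fees a b)

-- ===== LEMMAS AND PROOFS =====

lemma pathToRoot_step (n : Int) (h : 2 ≤ n) :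
    pathToRoot n = n :: pathToRoot (PySem.Int.floordiv n 2) := by
  rw [pathToRoot]
  rw [if_neg (by omega)]
  by_cases hm : PySem.Int.mod n 2 ≠ 0
  · rw [if_pos hm]
    have : PySem.Int.floordiv (n-1) 2 = PySem.Int.floordiv n 2 := by
      rw [PySem.Int.mod_eq_emod_of_pos (by omega)] at hm
      rw [PySem.Int.floordiv_eq_ediv_of_pos (by omega), PySem.Int.floordiv_eq_ediv_of_pos (by omega)]
      omega
    rw [this]
  · rw [if_neg hm]

lemma pathToRoot_head (n : Int) (h : 1 ≤ n) : ∃ t, pathToRoot n = n :: t := by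
  by_cases h2 : 2 ≤ n
  · exact ⟨_, pathToRoot_step n h2⟩
  · have hn1 : n = 1 := by omega
    subst hn1
    exact ⟨[], by rw [pathToRoot, if_pos (by omega)]⟩

lemma pathToRoot_mem : ∀ (n : Int), 1 ≤ n → ∀ m ∈ pathToRoot n, 1 ≤ m ∧ m ≤ n := by
  intro n hn m hm
  induction hN : n.toNat using Nat.strong_induction_on generalizing n m with
  | _ N ih =>
    by_cases h2 : 2 ≤ n
    · rw [pathToRoot_step n h2] at hm
      have hp : 1 ≤ PySem.Int.floordiv n 2 ∧ PySem.Int.floordiv n 2 < n := by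
        rw [PySem.Int.floordiv_eq_ediv_of_pos (by omega)]
        omega
      rcases List.mem_cons.mp hm with h | h
      · omega
      · have := ih (PySem.Int.floordiv n 2).toNat (by omega) _ hp.1 _ h rfl
        omega
    · have hn1 : n = 1 := by omega
      subst hn1
      rw [pathToRoot, if_pos (by omega)] at hm
      simp at hm
      omega

lemma pathToRoot_one_mem : ∀ (n : Int), 1 ≤ n → (1 : Int) ∈ pathToRoot n := by
  intro n hn
  induction hN : n.toNat using Nat.strong_induction_on generalizing n with
  | _ N ih =>
    by_cases h2 : 2 ≤ n
    · rw [pathToRoot_step n h2]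
      have hp : 1 ≤ PySem.Int.floordiv n 2 ∧ PySem.Int.floordiv n 2 < n := by
        rw [PySem.Int.floordiv_eq_ediv_of_pos (by omega)]
        omega
      exact List.mem_cons_of_mem _ (ih (PySem.Int.floordiv n 2).toNat (by omega) _ hp.1 rfl)
    · have hn1 : n = 1 := by omega
      subst hn1
      rw [pathToRoot, if_pos (by omega)]
      simp

lemma findXAux_shift (p1 : List Int) : ∀ (t : List Int) (x : Nat),
    findXAux p1 t (x + 1) = findXAux p1 t x + 1 := by
  intro t
  induction t with
  | nil => intro x; rfl
  | cons h t ih =>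
    intro x
    by_cases hc : h ∈ p1
    · simp [findXAux, hc]
    · simp [findXAux, hc, ih]

lemma findXAux_congr (p1 p1' : List Int) : ∀ (t : List Int) (x : Nat),
    (∀ h ∈ t, (h ∈ p1 ↔ h ∈ p1')) →
    findXAux p1 t x = findXAux p1' t x := by
  intro t
  induction t with
  | nil => intro x _; rfl
  | cons h t ih =>
    intro x hsame
    have hh := hsame h (List.mem_cons_self ..)
    by_cases hc : h ∈ p1
    · simp [findXAux, hc, hh.mp hc]
    · have hc' : h ∉ p1' := fun hx => hc (hh.mpr hx)
      simp [findXAux, hc, hc', ih _ (fun y hy => hsame y (List.mem_cons_of_mem _ hy))]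

lemma findXAux_found (p1 : List Int) : ∀ (t : List Int),
    (∃ h ∈ t, h ∈ p1) →
    ∃ v, t[findXAux p1 t 0]? = some v ∧ v ∈ p1 := by
  intro t
  induction t with
  | nil => rintro ⟨h, hh, _⟩; simp at hh
  | cons h t ih =>
    rintro ⟨w, hw, hcw⟩
    by_cases hc : h ∈ p1
    · exact ⟨h, by simp [findXAux, hc], hc⟩
    · have hwt : w ∈ t := by
        rcases List.mem_cons.mp hw with rfl | h'
        · exact absurd hcw hc
        · exact h'
      obtain ⟨v, hv, hcv⟩ := ih ⟨w, hwt, hcw⟩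
      refine ⟨v, ?_, hcv⟩
      simp [findXAux, hc, findXAux_shift, hv]

lemma PB_self (a : Int) (h : 1 ≤ a) : pathBeetwen a a = [a] := by
  obtain ⟨t, ht⟩ := pathToRoot_head a h
  rw [pathBeetwen, ht]
  simp [findXAux, List.idxOf?_cons]

lemma PB_gt (a b : Int) (hb : 1 ≤ b) (hab : b < a) :
    pathBeetwen a b = a :: pathBeetwen (PySem.Int.floordiv a 2) b := by
  have ha2 : 2 ≤ a := by omega
  have hpa : 1 ≤ PySem.Int.floordiv a 2 := by
    rw [PySem.Int.floordiv_eq_ediv_of_pos (by omega)]; omega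
  have hsplit := pathToRoot_step a ha2
  have hlt : ∀ h ∈ pathToRoot b, h < a := fun h hh => by
    have := pathToRoot_mem b hb h hh; omega
  have hx : findXAux (a :: pathToRoot (PySem.Int.floordiv a 2)) (pathToRoot b) 0
      = findXAux (pathToRoot (PySem.Int.floordiv a 2)) (pathToRoot b) 0 := by
    refine findXAux_congr _ _ _ 0 (fun h hh => ?_)
    have hne : h ≠ a := by have := hlt h hh; omega
    simp [hne]
  obtain ⟨v, hv, hcv⟩ := findXAux_found (pathToRoot (PySem.Int.floordiv a 2)) (pathToRoot b)
    ⟨1, pathToRoot_one_mem b hb, pathToRoot_one_mem _ hpa⟩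
  have hvne : v ≠ a := by
    have hm : v ∈ pathToRoot b := List.mem_of_getElem? hv
    have := hlt v hm; omega
  obtain ⟨i, hi⟩ : ∃ i, PySem.List.index? (pathToRoot (PySem.Int.floordiv a 2)) v = some i := by
    exact Option.isSome_iff_exists.mp ((PySem.List.index?_isSome_iff _ _).mpr hcv)
  rw [pathBeetwen, pathBeetwen, hsplit, hx]
  simp only [PySem.List.pyGet?_natCast, hv, Option.getD_some]
  rw [PySem.List.index?_cons_of_ne _ (Ne.symm hvne), hi]
  simp [List.take_succ_cons]

lemma PB_lt (a b : Int) (ha : 1 ≤ a) (hab : a < b) :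
    pathBeetwen a b = pathBeetwen a (PySem.Int.floordiv b 2) ++ [b] := by
  have hb2 : 2 ≤ b := by omega
  have hpb : 1 ≤ PySem.Int.floordiv b 2 := by
    rw [PySem.Int.floordiv_eq_ediv_of_pos (by omega)]; omega
  have hsplit := pathToRoot_step b hb2
  have hnb : b ∉ pathToRoot a := fun hh => by
    have := pathToRoot_mem a ha b hh; omega
  have hx : findXAux (pathToRoot a) (b :: pathToRoot (PySem.Int.floordiv b 2)) 0
      = findXAux (pathToRoot a) (pathToRoot (PySem.Int.floordiv b 2)) 0 + 1 := by
    simp [findXAux, hnb, findXAux_shift]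
  obtain ⟨v, hv, hcv⟩ := findXAux_found (pathToRoot a) (pathToRoot (PySem.Int.floordiv b 2))
    ⟨1, pathToRoot_one_mem _ hpb, pathToRoot_one_mem a ha⟩
  rw [pathBeetwen, pathBeetwen, hsplit, hx]
  simp only [PySem.List.pyGet?_natCast, List.getElem?_cons_succ, hv, Option.getD_some]
  simp [List.take_succ_cons, List.append_assoc]

lemma feeSum_cons_cons (fees : List (String × Int)) (u v : Int) (rest : List Int) :
    feeSum fees (u :: v :: rest)
      = ((PySem.Dict.mk fees).get? (edgeKey u v)).getD 0 + feeSum fees (v :: rest) := by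
  rw [feeSum]
  cases (PySem.Dict.mk fees).get? (edgeKey u v) <;> rfl

lemma feeSum_append_singleton (fees : List (String × Int)) :
    ∀ (L : List Int) (u c : Int), L.getLast? = some u →
      feeSum fees (L ++ [c]) = feeSum fees L + ((PySem.Dict.mk fees).get? (edgeKey u c)).getD 0 := by
  intro L
  induction L with
  | nil => intro u c h; simp at h
  | cons h0 t ih =>
    intro u c hlast
    cases t with
    | nil =>
      simp at hlast
      subst hlast
      rw [List.cons_append, List.nil_append, feeSum_cons_cons]
      simp [feeSum]
    | cons h1 t' =>
      rw [List.getLast?_cons_cons] at hlast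
      rw [List.cons_append, List.cons_append, feeSum_cons_cons, ← List.cons_append,
          ih u c hlast, feeSum_cons_cons]
      ring

lemma dict_getD_eq (fees : List (String × Int)) (k : String) :
    (PySem.Dict.mk fees).getD k 0 = ((PySem.Dict.mk fees).get? k).getD 0 := by
  rfl

lemma main_lemma (fees : List (String × Int)) : ∀ (N : Nat) (a b : Int),
    a.toNat + b.toNat ≤ N → 1 ≤ a → 1 ≤ b →
    (pathBeetwen a b).head? = some a ∧ (pathBeetwen a b).getLast? = some b ∧
      feeSum fees (pathBeetwen a b) = fee_on_path_alt fees a b := by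
  intro N
  induction N with
  | zero => intro a b hN ha hb; omega
  | succ N ih =>
    intro a b hN ha hb
    rcases lt_trichotomy a b with hlt | heq | hgt
    · -- a < b : peel b off the end of the path
      have hpb : 1 ≤ PySem.Int.floordiv b 2 ∧ PySem.Int.floordiv b 2 < b := by
        rw [PySem.Int.floordiv_eq_ediv_of_pos (by omega)]; omega
      obtain ⟨ihh, ihl, ihs⟩ := ih a (PySem.Int.floordiv b 2) (by omega) ha hpb.1
      have hPB := PB_lt a b ha hlt
      have hLne : pathBeetwen a (PySem.Int.floordiv b 2) ≠ [] := by
        intro h; rw [h] at ihh; simp at ihh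
      refine ⟨?_, ?_, ?_⟩
      · rw [hPB, List.head?_append_of_ne_nil _ hLne, ihh]
      · rw [hPB]; simp
      · rw [hPB, feeSum_append_singleton fees _ (PySem.Int.floordiv b 2) b ihl, ihs]
        conv_rhs => rw [fee_on_path_alt]
        rw [if_neg (by omega), if_neg (by omega), if_neg (by omega), dict_getD_eq]
        ring
    · -- a = b
      subst heq
      rw [PB_self a ha]
      refine ⟨rfl, rfl, ?_⟩
      rw [fee_on_path_alt, if_neg (by omega), if_pos rfl]
      rfl
    · -- b < a : peel a off the front of the path
      have hpa : 1 ≤ PySem.Int.floordiv a 2 ∧ PySem.Int.floordiv a 2 < a := by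
        rw [PySem.Int.floordiv_eq_ediv_of_pos (by omega)]; omega
      obtain ⟨ihh, ihl, ihs⟩ := ih (PySem.Int.floordiv a 2) b (by omega) hpa.1 hb
      have hPB := PB_gt a b hb hgt
      obtain ⟨t, ht⟩ : ∃ t, pathBeetwen (PySem.Int.floordiv a 2) b = PySem.Int.floordiv a 2 :: t := by
        cases hL : pathBeetwen (PySem.Int.floordiv a 2) b with
        | nil => rw [hL] at ihh; simp at ihh
        | cons x t =>
          rw [hL, List.head?_cons] at ihh
          exact ⟨t, by rw [Option.some.inj ihh]⟩
      refine ⟨?_, ?_, ?_⟩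
      · rw [hPB]; rfl
      · rw [hPB, ht, List.getLast?_cons_cons, ← ht, ihl]
      · rw [hPB, ht, feeSum_cons_cons, ← ht, ihs]
        conv_rhs => rw [fee_on_path_alt]
        rw [if_neg (by omega), if_neg (by omega), if_pos (by omega), dict_getD_eq]

-- ===== VERDICT (by name: the statement is the Claim_ definition above) =====
theorem fee_on_path_spec : Claim_equal_fee_on_path := by
  intro fees a b _ hpre
  unfold Spec_fee_on_path fee_on_path
  exact (main_lemma fees (a.toNat + b.toNat) a b le_rfl hpre.1 hpre.2).2.2
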